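-- pv_equiv track=rewrite | github.com/rightthumb/rightthumb-widgets-v0 | widgets/python/hotkeys.py | ws_line_cleaner_MF
-- ===== SOURCE A (Python) =====
-- import string
--
-- def ws_line_cleaner_MF(data):
--     data=str(data)
--     data = data.replace('\r','')
--
--     lines5=[]
--     for i, line in enumerate(data.split('\n')):
--         tester=line.replace(' ','').replace('\r','').replace('\t','')
--         for elem in string.whitespace:
--             while elem in tester: tester = tester.replace(elem, '')
--         if len(tester) == 0:
--             line=''
--         lines5.append(line)
--     data5='\n'.join(lines5)
--     return data5
-- ===== SOURCE B (Python) =====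
-- def ws_line_cleaner_MF(data):
--     data = str(data)
--     out = []
--     buf = []
--     blank = True
--     for ch in data:
--         if ch == '\r':
--             continue
--         if ch == '\n':
--             out.append('' if blank else ''.join(buf))
--             buf = []
--             blank = True
--         else:
--             buf.append(ch)
--             if ch not in ' \t\x0b\x0c':
--                 blank = False
--     out.append('' if blank else ''.join(buf))
--     return '\n'.join(out)
-- ===== Notes on version B (the rewrite author's own statement) =====
-- stated objective: alternative
-- what changed: Replaced the per-line pipeline (split into lines, then repeated replace/while-replace passes per line to test for whitespace-only, then join) by a single character-level pass that builds the output lines while tracking a blank flag.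
import Mathlib
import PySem

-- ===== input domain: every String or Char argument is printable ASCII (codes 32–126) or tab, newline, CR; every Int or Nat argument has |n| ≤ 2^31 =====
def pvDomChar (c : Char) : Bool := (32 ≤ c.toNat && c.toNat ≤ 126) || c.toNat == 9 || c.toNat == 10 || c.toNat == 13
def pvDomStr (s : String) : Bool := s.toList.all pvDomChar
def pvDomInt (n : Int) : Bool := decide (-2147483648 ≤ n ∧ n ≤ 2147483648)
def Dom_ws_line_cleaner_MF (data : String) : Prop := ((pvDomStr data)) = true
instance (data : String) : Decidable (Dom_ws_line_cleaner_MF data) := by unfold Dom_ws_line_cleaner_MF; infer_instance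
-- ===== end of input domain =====

-- B replaces A's split / per-line replace-loop whitespace test / join pipeline by a single
-- character pass tracking a blank-line flag (objective: alternative); return value only.

-- ===== PORT A =====
-- string.whitespace = ' \t\n\r\x0b\x0c'
def pyWhitespace : List Char := [' ', '\t', '\n', '\r', '\x0b', '\x0c']

-- 'while elem in tester: tester = tester.replace(elem, "")' — fuel (length+1) only makes the loop total
def whileRemoveC (e : Char) : Nat → List Char → List Char
  | 0, t => t
  | fuel+1, t =>
      if PySem.Chars.isIn [e] t then whileRemoveC e fuel (PySem.Chars.replace t [e] []) else t

-- tester = line.replace(' ','').replace('\r','').replace('\t',''); then the for/while loop over string.whitespace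
def testerA (line : List Char) : List Char :=
  let t := PySem.Chars.replace (PySem.Chars.replace (PySem.Chars.replace line [' '] []) ['\r'] []) ['\t'] []
  pyWhitespace.foldl (fun t e => whileRemoveC e (t.length + 1) t) t

def ws_line_cleaner_MF (data : String) : String :=
  let cs := PySem.Chars.replace data.toList ['\r'] []
  let lines := PySem.Chars.splitOn cs ['\n']
  let lines5 := lines.foldl
    (fun acc line => acc ++ [if (testerA line).length = 0 then ([] : List Char) else line]) []
  String.ofList (PySem.Chars.join ['\n'] lines5)

-- ===== PORT B =====
-- ch in ' \t\x0b\x0c'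
def bwsChar (c : Char) : Bool := decide (c = ' ') || decide (c = '\t') || decide (c = '\x0b') || decide (c = '\x0c')

-- one loop iteration of B: skip '\r', emit the line on '\n', else extend buf and update blank
def bStep (st : List (List Char) × List Char × Bool) (ch : Char) :
    List (List Char) × List Char × Bool :=
  let (out, buf, blank) := st
  if ch = '\r' then st
  else if ch = '\n' then (out ++ [if blank then [] else buf], [], true)
  else (out, buf ++ [ch], if bwsChar ch then blank else false)

def ws_line_cleaner_MF_alt (data : String) : String :=
  let st := data.toList.foldl bStep ([], [], true)
  String.ofList (PySem.Chars.join ['\n'] (st.1 ++ [if st.2.2 then [] else st.2.1]))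

-- ===== PRECONDITION & SPEC =====
def Spec_ws_line_cleaner_MF (data : String) (out : String) : Prop := out = ws_line_cleaner_MF_alt data
instance (data : String) (out : String) : Decidable (Spec_ws_line_cleaner_MF data out) := by unfold Spec_ws_line_cleaner_MF; infer_instance

-- ===== CLAIM (what is proved, stated in full; the proofs are below) =====
def Claim_equal_ws_line_cleaner_MF : Prop := ∀ (data : String), Dom_ws_line_cleaner_MF data → Spec_ws_line_cleaner_MF data (ws_line_cleaner_MF data)

-- ===== LEMMAS AND PROOFS =====

theorem replace_go_filter (c : Char) :
    ∀ (l : List Char) (fuel : Nat) (acc : List Char), l.length ≤ fuel →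
      PySem.Chars.replace.go [c] [] fuel l acc = acc.reverse ++ l.filter (fun x => x != c) := by
  intro l
  induction l with
  | nil =>
    intro fuel acc _
    cases fuel <;> simp [PySem.Chars.replace.go]
  | cons c' t ih =>
    intro fuel acc h
    cases fuel with
    | zero => simp at h
    | succ f =>
      simp only [PySem.Chars.replace.go]
      by_cases hc : c = c'
      · subst hc
        simp [List.isPrefixOf, ih f acc (by simpa using h)]
      · have hpre : [c].isPrefixOf (c' :: t) = false := by
          simp [List.isPrefixOf]; exact fun h' => hc h'
        simp only [hpre, if_false, Bool.false_eq_true]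
        rw [ih f (c' :: acc) (by simpa using h)]
        simp [Ne.symm hc]

theorem replace_single_filter (c : Char) (l : List Char) :
    PySem.Chars.replace l [c] [] = l.filter (fun x => x != c) := by
  simp [PySem.Chars.replace]
  simpa using replace_go_filter c l l.length [] le_rfl

theorem isIn_single (e : Char) (t : List Char) :
    PySem.Chars.isIn [e] t = t.contains e := by
  by_cases h : e ∈ t
  · rw [(PySem.Chars.isIn_iff_infix [e] t).mpr ((List.singleton_infix_iff e t).mpr h)]
    simp [h]
  · have := PySem.Chars.isIn_eq_false_iff (sub := [e]) (s := t)
    simp only [List.contains_eq_mem, h]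
    simp_all [List.singleton_infix_iff]

theorem whileRemoveC_not_mem (e : Char) (fuel : Nat) (t : List Char) (h : e ∉ t) :
    whileRemoveC e fuel t = t := by
  cases fuel with
  | zero => rfl
  | succ f =>
    simp [whileRemoveC, isIn_single, h]

theorem whileRemoveC_filter (e : Char) (t : List Char) :
    whileRemoveC e (t.length + 1) t = t.filter (fun x => x != e) := by
  by_cases h : e ∈ t
  · have hlen : 1 ≤ t.length := List.length_pos_of_mem h
    simp only [whileRemoveC, isIn_single, List.contains_eq_mem, h, decide_true, if_true]
    rw [replace_single_filter]
    have hnm : e ∉ t.filter (fun x => x != e) := by simp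
    cases ht : t.length with
    | zero => omega
    | succ n =>
      exact whileRemoveC_not_mem e _ _ hnm
  · rw [whileRemoveC_not_mem e _ t h]
    exact (List.filter_eq_self.mpr (by intro x hx; simp; rintro rfl; exact h hx)).symm

theorem testerA_eq_filter (l : List Char) :
    testerA l = l.filter (fun x => !pyWhitespace.contains x) := by
  simp only [testerA, pyWhitespace, List.foldl_cons, List.foldl_nil]
  rw [replace_single_filter, replace_single_filter, replace_single_filter]
  rw [whileRemoveC_filter, whileRemoveC_filter, whileRemoveC_filter, whileRemoveC_filter,
      whileRemoveC_filter, whileRemoveC_filter]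
  simp only [List.filter_filter]
  apply List.filter_congr
  intro x _
  by_cases h1 : x = ' ' <;> by_cases h2 : x = '\t' <;> by_cases h3 : x = '\n' <;>
    by_cases h4 : x = '\r' <;> by_cases h5 : x = '\x0b' <;> by_cases h6 : x = '\x0c' <;>
    simp_all

def splitNL : List Char → List Char → List (List Char)
  | carry, [] => [carry]
  | carry, x :: t => if x = '\n' then carry :: splitNL [] t else splitNL (carry ++ [x]) t

theorem splitOn_go_splitNL :
    ∀ (l : List Char) (fuel : Nat) (cur : List Char) (acc : List (List Char)), l.length ≤ fuel →
      PySem.Chars.splitOn.go ['\n'] fuel l cur acc = acc.reverse ++ splitNL cur.reverse l := by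
  intro l
  induction l with
  | nil =>
    intro fuel acc cur _
    cases fuel <;> simp [PySem.Chars.splitOn.go, splitNL]
  | cons c t ih =>
    intro fuel cur acc h
    cases fuel with
    | zero => simp at h
    | succ f =>
      simp only [PySem.Chars.splitOn.go]
      by_cases hc : c = '\n'
      · subst hc
        rw [if_pos (by simp [List.isPrefixOf])]
        simp only [List.length_cons, List.length_nil, List.drop_succ_cons, List.drop_zero]
        rw [ih f [] (cur.reverse :: acc) (by simpa using h)]
        simp [splitNL]
      · rw [if_neg (by simp [List.isPrefixOf]; exact fun h' => hc h'.symm)]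
        rw [ih f (c :: cur) acc (by simpa using h)]
        simp [splitNL, hc]

theorem splitOn_eq_splitNL (cs : List Char) :
    PySem.Chars.splitOn cs ['\n'] = splitNL [] cs := by
  have := splitOn_go_splitNL cs (cs.length + 1) [] [] (by omega)
  simpa [PySem.Chars.splitOn] using this

def emitA (l : List Char) : List Char :=
  if l.all (fun x => pyWhitespace.contains x) then [] else l

theorem emitA_eq (line : List Char) :
    (if (testerA line).length = 0 then ([] : List Char) else line) = emitA line := by
  rw [testerA_eq_filter, emitA]
  by_cases h : line.all (fun x => pyWhitespace.contains x)
  · rw [if_pos h, if_pos]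
    simp only [List.length_eq_zero_iff, List.filter_eq_nil_iff]
    intro x hx
    simp_all [List.all_eq_true]
  · rw [if_neg h, if_neg]
    simp only [List.length_eq_zero_iff, List.filter_eq_nil_iff]
    intro hall
    apply h
    simp only [List.all_eq_true]
    intro x hx
    simpa using hall x hx

theorem foldl_bStep_filter (l : List Char) (st : List (List Char) × List Char × Bool) :
    l.foldl bStep st = (l.filter (fun c => c != '\r')).foldl bStep st := by
  induction l generalizing st with
  | nil => rfl
  | cons c t ih =>
    by_cases h : c = '\r'
    · subst h
      simp only [List.filter_cons]
      have : bStep st '\r' = st := by obtain ⟨o, b, bl⟩ := st; simp [bStep]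
      simpa [this] using ih st
    · simp only [List.foldl_cons, List.filter_cons, bne_iff_ne, h, ne_eq, not_false_eq_true, if_true]
      exact ih _

theorem all_bws_eq_all_ws (buf : List Char) (hn : '\n' ∉ buf) (hr : '\r' ∉ buf) :
    buf.all bwsChar = buf.all (fun x => pyWhitespace.contains x) := by
  induction buf with
  | nil => rfl
  | cons x t ih =>
    simp only [List.mem_cons, not_or] at hn hr
    have h3 : x ≠ '\n' := fun h => hn.1 h.symm
    have h4 : x ≠ '\r' := fun h => hr.1 h.symm
    simp only [List.all_cons, ih hn.2 hr.2]
    congr 1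
    simp [bwsChar, pyWhitespace, h3, h4, Bool.or_assoc]

theorem bMain :
    ∀ (cs : List Char) (out : List (List Char)) (buf : List Char),
      '\r' ∉ cs → '\n' ∉ buf → '\r' ∉ buf →
      (cs.foldl bStep (out, buf, buf.all bwsChar)).1 ++
        [if (cs.foldl bStep (out, buf, buf.all bwsChar)).2.2 then []
         else (cs.foldl bStep (out, buf, buf.all bwsChar)).2.1]
      = out ++ (splitNL buf cs).map emitA := by
  intro cs
  induction cs with
  | nil =>
    intro out buf _ hn hr
    simp [splitNL, emitA, all_bws_eq_all_ws buf hn hr]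
  | cons c t ih =>
    intro out buf hcs hn hr
    have hc : c ≠ '\r' := fun h => hcs (h ▸ List.mem_cons_self)
    have ht : '\r' ∉ t := fun h => hcs (List.mem_cons_of_mem _ h)
    by_cases hnl : c = '\n'
    · subst hnl
      simp only [List.foldl_cons, bStep, if_neg hc, reduceIte]
      have h2 := ih (out ++ [if buf.all bwsChar then [] else buf]) [] ht (by simp) (by simp)
      simp only [List.all_nil] at h2
      rw [h2]
      simp [splitNL, emitA, all_bws_eq_all_ws buf hn hr]
    · simp only [List.foldl_cons, bStep, if_neg hc, if_neg hnl]
      have hall : (if bwsChar c then buf.all bwsChar else false) = (buf ++ [c]).all bwsChar := by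
        cases hb : bwsChar c <;> simp [List.all_append, hb, Bool.and_comm]
      rw [hall]
      have h2 := ih out (buf ++ [c]) ht (by simp [hn]; exact fun h => hnl h.symm) (by simp [hr]; exact fun h => hc h.symm)
      rw [h2]
      simp [splitNL, hnl]

theorem a_eq_b (data : String) : ws_line_cleaner_MF data = ws_line_cleaner_MF_alt data := by
  simp only [ws_line_cleaner_MF, ws_line_cleaner_MF_alt]
  rw [replace_single_filter, splitOn_eq_splitNL, foldl_bStep_filter]
  have hB := bMain (data.toList.filter (fun c => c != '\r')) [] [] (by simp) (by simp) (by simp)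
  simp only [List.all_nil] at hB
  rw [PySem.List.foldl_append_singleton_eq_map]
  simp only [emitA_eq]
  rw [hB]

-- ===== VERDICT (by name: the statement is the Claim_ definition above) =====
theorem ws_line_cleaner_MF_spec : Claim_equal_ws_line_cleaner_MF := by
  intro data _
  exact a_eq_b data
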